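-- pv_equiv track=rewrite | github.com/moodhood/Kattis_Contest_2025 | Week_1/desiigner.py | is_desiigner_string
-- ===== SOURCE A (Python) =====
-- def is_desiigner_string(s):
--     vowels = {'a', 'e', 'i', 'o', 'u', 'y'}
--
--     # Check if the string starts with 'b'
--     if not s.startswith('b'):
--         return False
--
--     # Find the index where the 'r's end and the vowel starts
--     r_count = 0
--     index = 1
--     while index < len(s) and s[index] == 'r':
--         r_count += 1
--         index += 1
--
--     # Check if there are at least two 'r's
--     if r_count < 2:
--         return False
--
--     # Check if the remaining part is a single vowel
--     if index >= len(s) or s[index] not in vowels or index != len(s) - 1: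
--         return False
--
--     return True
-- ===== SOURCE B (Python) =====
-- def is_desiigner_string(s):
--     return len(s) >= 4 and s[0] == 'b' and s[-1] in 'aeiouy' and set(s[1:-1]) == {'r'}
-- ===== Notes on version B (the rewrite author's own statement) =====
-- stated objective: simpler
-- what changed: Replaced A's index/r_count while-loop scan with a one-line whole-slice check: length >= 4, first char 'b', last char a vowel, and set(s[1:-1]) == {'r'}.
import Mathlib
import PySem

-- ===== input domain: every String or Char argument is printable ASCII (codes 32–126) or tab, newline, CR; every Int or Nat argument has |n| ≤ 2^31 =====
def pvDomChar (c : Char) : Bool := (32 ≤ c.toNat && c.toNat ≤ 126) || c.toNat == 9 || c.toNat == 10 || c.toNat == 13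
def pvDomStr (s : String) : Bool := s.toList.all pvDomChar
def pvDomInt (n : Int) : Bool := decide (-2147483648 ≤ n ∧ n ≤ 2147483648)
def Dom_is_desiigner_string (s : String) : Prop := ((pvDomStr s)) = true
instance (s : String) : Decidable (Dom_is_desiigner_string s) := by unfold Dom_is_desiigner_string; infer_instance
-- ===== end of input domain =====

-- B replaces A's explicit index/r_count scan loop with a one-line whole-slice check (objective: simpler).

-- ===== PORT A =====
def pvVowels : List Char := ['a', 'e', 'i', 'o', 'u', 'y']

-- the while loop: walks the suffix starting at index 1, returning (r_count, index)
def pvLoopA : List Char → Nat → Nat → Nat × Nat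
  | [], rc, idx => (rc, idx)
  | c :: rest, rc, idx => if c == 'r' then pvLoopA rest (rc + 1) (idx + 1) else (rc, idx)

def is_desiigner_string (s : String) : Bool :=
  let cs := s.toList
  if ¬ PySem.Chars.startswith cs ['b'] then false
  else
    let p := pvLoopA (cs.drop 1) 0 1
    if p.1 < 2 then false
    else if cs.length ≤ p.2 || !(pvVowels.contains (cs.getD p.2 ' ')) || p.2 ≠ cs.length - 1 then
      false
    else true

-- ===== PORT B =====
def is_desiigner_string_alt (s : String) : Bool :=
  let cs := s.toList
  decide (4 ≤ cs.length) &&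
    (PySem.List.pyGet? cs 0 == some 'b') &&
    (pvVowels.contains (PySem.List.pyGetD cs (-1) ' ')) &&
    PySem.Set.equal (PySem.Set.ofList (PySem.List.slice cs (some 1) (some (-1)))) (PySem.Set.ofList ['r'])

-- ===== PRECONDITION & SPEC =====
def Spec_is_desiigner_string (s : String) (out : Bool) : Prop := out = is_desiigner_string_alt s
instance (s : String) (out : Bool) : Decidable (Spec_is_desiigner_string s out) := by unfold Spec_is_desiigner_string; infer_instance

-- ===== CLAIM (what is proved, stated in full; the proofs are below) =====
def Claim_equal_is_desiigner_string : Prop := ∀ (s : String), Dom_is_desiigner_string s → Spec_is_desiigner_string s (is_desiigner_string s)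

-- ===== LEMMAS AND PROOFS =====

theorem pvLoopA_spec (l : List Char) (rc idx : Nat) :
    pvLoopA l rc idx = (rc + (l.takeWhile (· == 'r')).length, idx + (l.takeWhile (· == 'r')).length) := by
  induction l generalizing rc idx with
  | nil => simp [pvLoopA]
  | cons c rest ih =>
    by_cases h : c == 'r'
    · simp [pvLoopA, h, ih, List.takeWhile]
      omega
    · simp [pvLoopA, h, List.takeWhile]


theorem pv_slice (mid : List Char) (v : Char) :
    PySem.List.slice (('b' :: (mid ++ [v]))) (some 1) (some (-1)) = mid := by
  simp [PySem.List.slice, PySem.List.clampIdx]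
  rw [if_neg (by omega)]
  simp

theorem pv_last (mid : List Char) (v : Char) :
    PySem.List.pyGetD ('b' :: (mid ++ [v])) (-1) ' ' = v := by
  simp [PySem.List.pyGetD, PySem.List.pyGet?, PySem.List.pyIdx?]

theorem pv_set (mid : List Char) :
    PySem.Set.equal (PySem.Set.ofList mid) (PySem.Set.ofList ['r']) = true ↔ (∀ c ∈ mid, c = 'r') ∧ 'r' ∈ mid := by
  simp [PySem.Set.equal, PySem.Set.issubset, PySem.Set.mem_ofList]

theorem pv_vowel_ne_r {v : Char} (h : pvVowels.contains v = true) : v ≠ 'r' := by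
  simp [pvVowels] at h
  rcases h with h|h|h|h|h|h <;> simp [h]

theorem pv_takeWhile_all_r {mid : List Char} {v : Char} (hall : ∀ c ∈ mid, c = 'r') (hv : v ≠ 'r') :
    (mid ++ [v]).takeWhile (· == 'r') = mid := by
  induction mid with
  | nil => simp [hv]
  | cons c rest ih =>
    have hc : c = 'r' := hall c (by simp)
    subst hc
    simp only [List.cons_append, List.takeWhile_cons]
    simp [ih (fun c h => hall c (by simp [h]))]

theorem pv_takeWhile_len {mid : List Char} {v : Char}
    (h : ((mid ++ [v]).takeWhile (· == 'r')).length = mid.length) : ∀ c ∈ mid, c = 'r' := by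
  have hpfx : (mid ++ [v]).takeWhile (· == 'r') <+: (mid ++ [v]) := List.takeWhile_prefix _
  have heq : (mid ++ [v]).takeWhile (· == 'r') = (mid ++ [v]).take mid.length := by
    rw [List.prefix_iff_eq_take.mp hpfx, h]
  rw [List.take_left] at heq
  intro c hc
  have := List.mem_takeWhile_imp (l := mid ++ [v]) (p := (· == 'r')) (heq ▸ hc)
  simpa using this

theorem pv_getD (mid : List Char) (v : Char) :
    ('b' :: (mid ++ [v])).getD (1 + mid.length) ' ' = v := by
  simp [List.getD, Nat.add_comm 1 mid.length]

theorem pv_main (cs : List Char) :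
    (if ¬ PySem.Chars.startswith cs ['b'] then false
     else
       let p := pvLoopA (cs.drop 1) 0 1
       if p.1 < 2 then false
       else if cs.length ≤ p.2 || !(pvVowels.contains (cs.getD p.2 ' ')) || p.2 ≠ cs.length - 1 then false
       else true) =
    (decide (4 ≤ cs.length) &&
      (PySem.List.pyGet? cs 0 == some 'b') &&
      (pvVowels.contains (PySem.List.pyGetD cs (-1) ' ')) &&
      PySem.Set.equal (PySem.Set.ofList (PySem.List.slice cs (some 1) (some (-1)))) (PySem.Set.ofList ['r'])) := by
  match cs with
  | [] => decide
  | c :: rest =>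
    by_cases hb : c = 'b'
    · subst hb
      rcases List.eq_nil_or_concat rest with hr | ⟨mid, v, hr⟩
      · subst hr; decide
      · subst hr
        simp only [List.concat_eq_append]
        have hsw : PySem.Chars.startswith ('b' :: (mid ++ [v])) ['b'] = true := by
          rw [PySem.Chars.startswith_iff]; exact ⟨mid ++ [v], rfl⟩
        have hlen : ('b' :: (mid ++ [v])).length = mid.length + 2 := by simp
        have hget0 : (PySem.List.pyGet? ('b' :: (mid ++ [v])) 0 == some 'b') = true := by
          simp [PySem.List.pyGet?, PySem.List.pyIdx?]
          rw [if_pos (by omega)]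
          simp
        simp only [List.drop_succ_cons, List.drop_zero, pvLoopA_spec, Nat.zero_add]
        set k := ((mid ++ [v]).takeWhile (· == 'r')).length with hkdef
        rw [if_neg (by simp [hsw]), pv_slice, pv_last, hget0]
        by_cases hgood : k = mid.length ∧ 2 ≤ k
        · obtain ⟨hk, h2⟩ := hgood
          rw [if_neg (by omega), hk, hlen, pv_getD]
          have h1 : (decide (mid.length + 2 ≤ 1 + mid.length)) = false := by
            rw [decide_eq_false_iff_not]; omega
          have h3 : (decide (1 + mid.length ≠ mid.length + 2 - 1)) = false := by
            rw [decide_eq_false_iff_not]; omega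
          rw [h1, h3]
          have hall : ∀ c ∈ mid, c = 'r' := pv_takeWhile_len (v := v) (by rw [← hkdef, hk])
          have hrmem : 'r' ∈ mid := by
            have hne : mid ≠ [] := by intro h; rw [h] at hk; simp at hk; omega
            obtain ⟨c, hc⟩ := List.exists_mem_of_ne_nil mid hne
            exact (hall c hc) ▸ hc
          have hset : PySem.Set.equal (PySem.Set.ofList mid) (PySem.Set.ofList ['r']) = true :=
            (pv_set mid).mpr ⟨hall, hrmem⟩
          rw [hset]
          have h4 : (decide (4 ≤ mid.length + 2)) = true := by
            rw [decide_eq_true_eq]; omega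
          rw [h4]
          cases hcv : pvVowels.contains v <;> simp
        · trans false
          · by_cases h2 : k < 2
            · rw [if_pos h2]
            · have hk : k ≠ mid.length := fun h => hgood ⟨h, by omega⟩
              rw [if_neg h2, if_pos]
              simp only [Bool.or_eq_true, decide_eq_true_eq]
              right
              rw [hlen]
              omega
          · symm
            rw [Bool.eq_false_iff]
            intro hR
            simp only [Bool.and_eq_true, decide_eq_true_eq] at hR
            obtain ⟨⟨⟨h4, _⟩, hvv⟩, hset⟩ := hR
            rw [pv_set] at hset
            obtain ⟨hall, _⟩ := hset
            have hk' : k = mid.length := by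
              rw [hkdef, pv_takeWhile_all_r hall (pv_vowel_ne_r hvv)]
            rw [hlen] at h4
            exact hgood ⟨hk', by omega⟩
    · have hsw : PySem.Chars.startswith (c :: rest) ['b'] = false := by
        rw [Bool.eq_false_iff]
        intro h
        rw [PySem.Chars.startswith_iff] at h
        obtain ⟨t, ht⟩ := h
        exact hb (by injection ht with h1 _; exact h1.symm)
      rw [if_pos (by simp [hsw])]
      have hne : (PySem.List.pyGet? (c :: rest) 0 == some 'b') = false := by
        simp [PySem.List.pyGet?, PySem.List.pyIdx?]
        exact hb
      rw [hne]
      simp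

-- ===== VERDICT (by name: the statement is the Claim_ definition above) =====
theorem is_desiigner_string_spec : Claim_equal_is_desiigner_string := by
  intro s _
  unfold Spec_is_desiigner_string is_desiigner_string is_desiigner_string_alt
  exact pv_main s.toList
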